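-- pv_equiv track=rewrite | github.com/dettorig/BinPolyOpt | inequality_classifier.py | _find_running_intersection_order
-- ===== SOURCE A (Python) =====
-- def _find_running_intersection_order(sets_list):
--     """
--     Backtracking search for a running–intersection ordering.
--     sets_list: list of (idx, set_of_vertices).
--     Returns a list of indices into sets_list if an order exists, else None.
--     """
--     m = len(sets_list)
--     sets_only = [s for _, s in sets_list]
--
--     def ok_to_place(k, order):
--         S_union = set()
--         for j in order:
--             S_union |= sets_only[j]
--         inter = sets_only[k] & S_union
--         if not inter:
--             return True
--         for j in order:
--             if inter <= sets_only[j]: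
--                 return True
--         return False
--
--     order = []
--     used = [False] * m
--
--     def backtrack():
--         if len(order) == m:
--             return True
--         for k in range(m):
--             if used[k]:
--                 continue
--             if ok_to_place(k, order):
--                 used[k] = True
--                 order.append(k)
--                 if backtrack():
--                     return True
--                 order.pop()
--                 used[k] = False
--         return False
--
--     return order if backtrack() else None
-- ===== SOURCE B (Python) =====
-- def _find_running_intersection_order(sets_list):
--     """Flat enumerate-and-test: try full orderings in lexicographic order and
--     return the first one that is a running-intersection ordering, else None."""
--     sets_only = [s for _, s in sets_list]
--
--     def picks(avail):
--         # all ways to pick one element, paired with the remaining list (in order)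
--         if not avail:
--             return []
--         x, xs = avail[0], avail[1:]
--         return [(x, xs)] + [(k, [x] + r) for k, r in picks(xs)]
--
--     def perms(avail):
--         # all permutations of avail, lazily, in lexicographic order
--         if not avail:
--             yield []
--             return
--         for k, rest in picks(avail):
--             for tail in perms(rest):
--                 yield [k] + tail
--
--     def valid(perm):
--         placed = []
--         union = set()
--         for k in perm:
--             inter = sets_only[k] & union
--             if inter and not any(inter <= sets_only[j] for j in placed):
--                 return False
--             union |= sets_only[k]
--             placed.append(k)
--         return True
--
--     for perm in perms(list(range(len(sets_only)))):
--         if valid(perm):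
--             return perm
--     return None
-- ===== Notes on version B (the rewrite author's own statement) =====
-- stated objective: alternative
-- what changed: Replaces the mutating backtracking DFS (used-array, shared order list, recursive ok_to_place pruning with the union recomputed at every node) by a flat generate-and-test loop: lazily enumerate all permutations of range(m) in lexicographic order and return the first one whose left-to-right walk, carrying a single accumulated union, passes the running-intersection check at every position.
import Mathlib
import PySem

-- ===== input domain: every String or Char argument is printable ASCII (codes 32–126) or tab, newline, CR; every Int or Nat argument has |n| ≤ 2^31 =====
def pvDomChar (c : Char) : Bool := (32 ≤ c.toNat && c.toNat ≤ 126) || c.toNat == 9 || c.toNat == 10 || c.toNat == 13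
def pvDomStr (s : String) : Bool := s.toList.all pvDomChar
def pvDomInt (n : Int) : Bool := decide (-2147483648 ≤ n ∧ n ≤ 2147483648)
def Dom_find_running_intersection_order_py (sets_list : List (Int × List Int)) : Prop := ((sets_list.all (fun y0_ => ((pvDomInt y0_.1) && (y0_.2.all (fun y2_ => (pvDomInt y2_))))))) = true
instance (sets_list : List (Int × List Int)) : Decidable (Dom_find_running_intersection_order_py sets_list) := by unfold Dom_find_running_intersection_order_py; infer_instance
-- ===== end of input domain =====

-- B replaces A's mutating backtracking DFS by a flat lazy generate-and-test over all
-- permutations in lexicographic order (objective: alternative, same worst-case cost).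

-- ===== PORT A =====
-- sets_only[j]  (indices are always in range in both programs)
def pvGetSet (so : List (List Int)) (j : Int) : List Int := PySem.List.pyGetD so j []

-- A's ok_to_place(k, order)
def pvOk (so : List (List Int)) (k : Int) (order : List Int) : Bool :=
  let S_union := order.foldl (fun u j => PySem.Set.union u (pvGetSet so j)) PySem.Set.empty
  let inter := PySem.Set.inter (pvGetSet so k) S_union
  if inter.isEmpty then true
  else order.any (fun j => PySem.Set.issubset inter (pvGetSet so j))

-- the 'for k in range(m)' loop inside A's backtrack(); f is the recursive call
def pvBtGo (so : List (List Int)) (f : List Bool → List Int → Option (List Int))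
    (used : List Bool) (order : List Int) : List Int → Option (List Int)
  | [] => none
  | k :: ks =>
    if PySem.List.pyGetD used k false then pvBtGo so f used order ks
    else if pvOk so k order then
      match f (PySem.List.pySetD used k true) (order ++ [k]) with
      | some r => some r
      | none => pvBtGo so f used order ks
    else pvBtGo so f used order ks

-- A's backtrack(); success returns the order.  fuel = m - len(order) bounds the
-- recursion depth (a totality guard only; it is never exhausted).
def pvBt (so : List (List Int)) (m : Int) : Nat → List Bool → List Int → Option (List Int)
  | 0, _used, order => if PySem.List.len order = m then some order else none
  | fuel+1, used, order =>
    if PySem.List.len order = m then some order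
    else pvBtGo so (pvBt so m fuel) used order (PySem.List.pyRange 0 m 1)

def find_running_intersection_order_py (sets_list : List (Int × List Int)) : Option (List Int) :=
  let m : Int := PySem.List.len sets_list
  let sets_only := sets_list.map (fun p => p.2)
  pvBt sets_only m m.toNat (List.replicate m.toNat false) []

-- ===== PORT B =====
-- picks(avail): each element paired with the remaining list, in order
def pvPicks : List Int → List (Int × List Int)
  | [] => []
  | x :: xs => (x, xs) :: (pvPicks xs).map (fun p => (p.1, x :: p.2))

-- perms(avail): all permutations in lexicographic order (fuel = length, a totality guard)
def pvPerms : Nat → List Int → List (List Int)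
  | _, [] => [[]]
  | 0, _ => []
  | fuel+1, avail =>
    (pvPicks avail).flatMap (fun p => (pvPerms fuel p.2).map (fun tail => p.1 :: tail))

-- the loop body of B's valid(perm)
def pvValidGo (so : List (List Int)) (placed : List Int) (u : PySem.Set Int) :
    List Int → Bool
  | [] => true
  | k :: rest =>
    let inter := PySem.Set.inter (pvGetSet so k) u
    if !inter.isEmpty && !(placed.any fun j => PySem.Set.issubset inter (pvGetSet so j)) then
      false
    else pvValidGo so (placed ++ [k]) (PySem.Set.union u (pvGetSet so k)) rest

def pvValid (so : List (List Int)) (perm : List Int) : Bool :=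
  pvValidGo so [] PySem.Set.empty perm

def find_running_intersection_order_py_alt (sets_list : List (Int × List Int)) : Option (List Int) :=
  let sets_only := sets_list.map (fun p => p.2)
  let l := PySem.List.pyRange 0 (PySem.List.len sets_only) 1
  (pvPerms l.length l).find? (pvValid sets_only)

-- ===== PRECONDITION & SPEC =====
def Spec_find_running_intersection_order_py (sets_list : List (Int × List Int)) (out : Option (List Int)) : Prop := out = find_running_intersection_order_py_alt sets_list
instance (sets_list : List (Int × List Int)) (out : Option (List Int)) : Decidable (Spec_find_running_intersection_order_py sets_list out) := by unfold Spec_find_running_intersection_order_py; infer_instance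

-- ===== CLAIM (what is proved, stated in full; the proofs are below) =====
def Claim_equal_find_running_intersection_order_py : Prop := ∀ (sets_list : List (Int × List Int)), Dom_find_running_intersection_order_py sets_list → Spec_find_running_intersection_order_py sets_list (find_running_intersection_order_py sets_list)

-- ===== LEMMAS AND PROOFS =====

-- a prefix of a permutation is extendable: every position passes A's ok_to_place
def pvExtOK (so : List (List Int)) (order : List Int) : List Int → Bool
  | [] => true
  | k :: p => if pvOk so k order then pvExtOK so (order ++ [k]) p else false

-- first non-none entry
def pvFirstSome {α : Type} : List (Option α) → Option α
  | [] => none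
  | o :: os => match o with | some r => some r | none => pvFirstSome os

lemma pvFirstSome_cons {α : Type} (o : Option α) (os : List (Option α)) :
    pvFirstSome (o :: os) = o.or (pvFirstSome os) := by
  cases o <;> simp [pvFirstSome, Option.or]

lemma pvBtGo_eq_chain (so : List (List Int)) (f : List Bool → List Int → Option (List Int))
    (used : List Bool) (order : List Int) : ∀ ks : List Int,
    pvBtGo so f used order ks =
      pvFirstSome ((ks.filter (fun k => !PySem.List.pyGetD used k false)).map
        (fun k => if pvOk so k order then f (PySem.List.pySetD used k true) (order ++ [k]) else none)) := by
  intro ks; induction ks with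
  | nil => simp [pvBtGo, pvFirstSome]
  | cons k ks ih =>
    by_cases h : PySem.List.pyGetD used k false
    · simp [pvBtGo, h, ih]
    · by_cases hok : pvOk so k order
      · simp only [pvBtGo, h, hok, if_true, Bool.not_false,
          List.filter_cons_of_pos, List.map_cons, pvFirstSome_cons]
        cases hf : f (PySem.List.pySetD used k true) (order ++ [k]) <;>
          simp [Option.or, ih]
      · simp [pvBtGo, h, hok, pvFirstSome_cons, ih]

lemma pv_find_flatMap {α β : Type} (p : α → Bool) (f : β → List α) : ∀ l : List β,
    List.find? p (l.flatMap f) = pvFirstSome (l.map (fun a => List.find? p (f a))) := by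
  intro l; induction l with
  | nil => simp [pvFirstSome]
  | cons a l ih => simp [List.flatMap_cons, List.find?_append, pvFirstSome_cons, ih]

lemma pv_map_firstSome {α β : Type} (g : α → β) : ∀ l : List (Option α),
    Option.map g (pvFirstSome l) = pvFirstSome (l.map (Option.map g)) := by
  intro l; induction l with
  | nil => simp [pvFirstSome]
  | cons o os ih => cases o <;> simp [pvFirstSome, ih]
lemma pv_picks_fst : ∀ l : List Int, (pvPicks l).map Prod.fst = l := by
  intro l; induction l with
  | nil => simp [pvPicks]
  | cons x xs ih => simp [pvPicks, List.map_map, Function.comp_def]; exact ih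

lemma pv_picks_mem : ∀ (l : List Int) (q : Int × List Int), q ∈ pvPicks l →
    ∃ pre post, l = pre ++ q.1 :: post ∧ q.2 = pre ++ post := by
  intro l; induction l with
  | nil => intro q h; simp [pvPicks] at h
  | cons x xs ih =>
    intro q h
    simp only [pvPicks, List.mem_cons, List.mem_map] at h
    rcases h with h | ⟨p, hp, rfl⟩
    · exact ⟨[], xs, by simp [h]⟩
    · obtain ⟨pre, post, h1, h2⟩ := ih p hp
      exact ⟨x :: pre, post, by simp [h1], by simp [h2]⟩

lemma pv_sorted_ext : ∀ (l1 l2 : List Int), l1.Pairwise (· < ·) → l2.Pairwise (· < ·) →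
    (∀ x, x ∈ l1 ↔ x ∈ l2) → l1 = l2 := by
  intro l1
  induction l1 with
  | nil => intro l2 _ _ h; cases l2 with
    | nil => rfl
    | cons b t => exact absurd ((h b).mpr (by simp)) (by simp)
  | cons a s ih =>
    intro l2 h1 h2 h
    cases l2 with
    | nil => exact absurd ((h a).mp (by simp)) (by simp)
    | cons b t =>
      have hab : a = b := by
        rcases List.mem_cons.mp ((h a).mp (by simp)) with he | hat
        · exact he
        · rcases List.mem_cons.mp ((h b).mpr (by simp)) with he | hbs
          · omega
          · have h1' := (List.pairwise_cons.mp h1).1 b hbs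
            have h2' := (List.pairwise_cons.mp h2).1 a hat
            omega
      subst hab
      have hst : ∀ x, x ∈ s ↔ x ∈ t := by
        intro x
        constructor
        · intro hx
          have hax := (List.pairwise_cons.mp h1).1 x hx
          rcases List.mem_cons.mp ((h x).mp (by simp [hx])) with he | hxt
          · omega
          · exact hxt
        · intro hx
          have hax := (List.pairwise_cons.mp h2).1 x hx
          rcases List.mem_cons.mp ((h x).mpr (by simp [hx])) with he | hxs
          · omega
          · exact hxs
      rw [ih t (List.pairwise_cons.mp h1).2 (List.pairwise_cons.mp h2).2 hst]

lemma pv_valid_extOK (so : List (List Int)) : ∀ (perm placed : List Int) (U : PySem.Set Int),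
    U = placed.foldl (fun u j => PySem.Set.union u (pvGetSet so j)) PySem.Set.empty →
    pvValidGo so placed U perm = pvExtOK so placed perm := by
  intro perm
  induction perm with
  | nil => intro placed U hU; simp [pvValidGo, pvExtOK]
  | cons k rest ih =>
    intro placed U hU
    have hok : pvOk so k placed =
        ((PySem.Set.inter (pvGetSet so k) U).isEmpty ||
          placed.any (fun j => PySem.Set.issubset (PySem.Set.inter (pvGetSet so k) U) (pvGetSet so j))) := by
      rw [pvOk, ← hU]
      by_cases h : (PySem.Set.inter (pvGetSet so k) U).isEmpty <;> simp [h]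
    have hU' : PySem.Set.union U (pvGetSet so k) =
        (placed ++ [k]).foldl (fun u j => PySem.Set.union u (pvGetSet so j)) PySem.Set.empty := by
      rw [List.foldl_append, ← hU]; rfl
    simp only [pvValidGo, pvExtOK, hok]
    by_cases he : (PySem.Set.inter (pvGetSet so k) U).isEmpty <;>
      by_cases ha : placed.any (fun j => PySem.Set.issubset (PySem.Set.inter (pvGetSet so k) U) (pvGetSet so j)) <;>
      simp [he, ha, ih (placed ++ [k]) _ hU']

lemma pv_filter_eq (mNat : Nat) (used : List Bool) (rem : List Int)
    (hmem : ∀ j ∈ rem, ∃ k : Nat, k < mNat ∧ j = (k : Int))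
    (hp : rem.Pairwise (· < ·))
    (hu : ∀ k : Nat, k < mNat → PySem.List.pyGetD used (k : Int) false = !(decide ((k : Int) ∈ rem))) :
    (PySem.List.pyRange 0 (mNat : Int) 1).filter (fun k => !PySem.List.pyGetD used k false) = rem := by
  apply pv_sorted_ext
  · apply List.Pairwise.filter
    rw [PySem.List.pyRange_zero_natCast]
    exact (List.pairwise_lt_range).map _ (by intro a b hab; exact_mod_cast hab)
  · exact hp
  · intro x
    simp only [List.mem_filter]
    constructor
    · rintro ⟨hx, hb⟩
      have hr := PySem.List.mem_pyRange_one.mp hx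
      obtain ⟨k, hk, rfl⟩ : ∃ k : Nat, k < mNat ∧ x = (k : Int) :=
        ⟨x.toNat, by omega, by omega⟩
      rw [hu k hk] at hb
      simpa using hb
    · intro hx
      obtain ⟨k, hk, rfl⟩ := hmem x hx
      refine ⟨PySem.List.mem_pyRange_one.mpr (by constructor <;> omega), ?_⟩
      rw [hu k hk]
      simpa using hx

lemma pvPerms_nil (fuel : Nat) : pvPerms fuel [] = [[]] := by cases fuel <;> rfl

lemma pvPerms_succ_cons (fuel : Nat) (r : Int) (rs : List Int) :
    pvPerms (fuel+1) (r :: rs) =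
      (pvPicks (r :: rs)).flatMap (fun p => (pvPerms fuel p.2).map (fun tail => p.1 :: tail)) := rfl

lemma pv_main (so : List (List Int)) (mNat : Nat) :
    ∀ (fuel : Nat) (used : List Bool) (order rem : List Int),
    used.length = mNat →
    (∀ j ∈ rem, ∃ k : Nat, k < mNat ∧ j = (k : Int)) →
    rem.Pairwise (· < ·) →
    (∀ k : Nat, k < mNat → PySem.List.pyGetD used (k : Int) false = !(decide ((k : Int) ∈ rem))) →
    order.length + rem.length = mNat →
    rem.length ≤ fuel →
    pvBt so (mNat : Int) fuel used order =
      ((pvPerms fuel rem).find? (pvExtOK so order)).map (order ++ ·) := by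
  intro fuel
  induction fuel with
  | zero =>
    intro used order rem hlen hmem hp hu hsum hfuel
    have hrem : rem = [] := List.eq_nil_of_length_eq_zero (by omega)
    subst hrem
    have ho : order.length = mNat := by simpa using hsum
    simp [pvBt, pvPerms, pvExtOK, PySem.List.len_eq, ho]
  | succ fuel ih =>
    intro used order rem hlen hmem hp hu hsum hfuel
    cases rem with
    | nil =>
      have ho : order.length = mNat := by simpa using hsum
      simp [pvBt, pvPerms_nil, pvExtOK, PySem.List.len_eq, ho]
    | cons r rs =>
      have hno : ¬ (PySem.List.len order = (mNat : Int)) := by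
        simp only [PySem.List.len_eq]
        have := hsum; simp at this; omega
      rw [show pvBt so (mNat : Int) (fuel+1) used order =
            if PySem.List.len order = (mNat : Int) then some order
            else pvBtGo so (pvBt so (mNat : Int) fuel) used order
              (PySem.List.pyRange 0 (mNat : Int) 1) from rfl,
          if_neg hno, pvBtGo_eq_chain, pv_filter_eq mNat used (r :: rs) hmem hp hu,
          pvPerms_succ_cons, pv_find_flatMap]
      rw [pv_map_firstSome, List.map_map]
      conv_lhs => rw [show (r :: rs) = (pvPicks (r :: rs)).map Prod.fst from (pv_picks_fst _).symm,
        List.map_map]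
      apply congrArg pvFirstSome
      apply List.map_congr_left
      intro q hq
      obtain ⟨pre, post, hl, hr⟩ := pv_picks_mem _ q hq
      have hq1 : q.1 ∈ r :: rs := by rw [hl]; simp
      obtain ⟨k0, hk0, hq1e⟩ := hmem q.1 hq1
      have hnodup : q.1 ∉ q.2 := by
        rw [hr]
        have hp' : (pre ++ q.1 :: post).Pairwise (· < ·) := hl ▸ hp
        intro hmem'
        rcases List.mem_append.mp hmem' with hpre | hpost
        · exact absurd ((List.pairwise_append.mp hp').2.2 q.1 hpre q.1 (by simp)) (lt_irrefl _)
        · exact absurd ((List.pairwise_cons.mp (List.pairwise_append.mp hp').2.1).1 q.1 hpost)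
            (lt_irrefl _)
      simp only [Function.comp_apply, List.find?_map]
      have hpred : (pvExtOK so order ∘ fun t => q.1 :: t) =
          fun t => if pvOk so q.1 order then pvExtOK so (order ++ [q.1]) t else false := by
        funext t; simp [pvExtOK, Function.comp]
      rw [hpred]
      by_cases hok : pvOk so q.1 order
      · simp only [hok, if_true]
        have hIH := ih (PySem.List.pySetD used q.1 true) (order ++ [q.1]) q.2
          (by rw [PySem.List.length_pySetD]; exact hlen)
          (by intro j hj; exact hmem j (by rw [hl]; rw [hr] at hj; simp at hj ⊢; tauto))
          (by rw [hr]
              exact List.Pairwise.sublist ((List.sublist_cons_self q.1 post).append_left pre)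
                (hl ▸ hp))
          (by
            intro k hk
            rw [hq1e, PySem.List.pyGetD_pySetD_natCast used k0 k true false (by omega)]
            by_cases hkk : k = k0
            · subst hkk
              have : ((k : Int) ∉ q.2) := by rw [← hq1e]; exact hnodup
              simp [this]
            · rw [if_neg hkk, hu k hk]
              have hiff : ((k : Int) ∈ r :: rs) ↔ ((k : Int) ∈ q.2) := by
                rw [hl, hr]
                have hne : (k : Int) ≠ q.1 := by rw [hq1e]; exact_mod_cast hkk
                simp [List.mem_append, hne]
              simp [hiff])
          (by
            have h1 : (r :: rs).length = pre.length + post.length + 1 := by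
              rw [hl]; simp only [List.length_append, List.length_cons]; omega
            have h2 : q.2.length = pre.length + post.length := by
              rw [hr]; simp only [List.length_append]
            have h3 := hsum
            simp only [List.length_append, List.length_cons, List.length_nil] at h3 ⊢
            omega)
          (by
            have h1 : (r :: rs).length = pre.length + post.length + 1 := by
              rw [hl]; simp only [List.length_append, List.length_cons]; omega
            have h2 : q.2.length = pre.length + post.length := by
              rw [hr]; simp only [List.length_append]
            omega)
        rw [hIH, Option.map_map]
        apply congrArg₂ Option.map ?_ rfl
        funext t; simp
      · simp only [hok]
        rw [List.find?_eq_none.mpr (by intro a _; simp)]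
        rfl

-- ===== VERDICT (by name: the statement is the Claim_ definition above) =====
theorem find_running_intersection_order_py_spec : Claim_equal_find_running_intersection_order_py := by
  intro sets_list _dom
  unfold Spec_find_running_intersection_order_py find_running_intersection_order_py
    find_running_intersection_order_py_alt
  simp only [PySem.List.len_eq, List.length_map, Int.toNat_natCast]
  have hrange := PySem.List.pyRange_zero_natCast sets_list.length
  have hlenrem : (PySem.List.pyRange 0 (sets_list.length : Int) 1).length = sets_list.length := by
    rw [hrange]; simp
  have hval : pvValid (sets_list.map (fun p => p.2)) =
      pvExtOK (sets_list.map (fun p => p.2)) [] := by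
    funext perm
    exact pv_valid_extOK _ perm [] PySem.Set.empty rfl
  have hmain := pv_main (sets_list.map (fun p => p.2)) sets_list.length sets_list.length
    (List.replicate sets_list.length false) [] (PySem.List.pyRange 0 (sets_list.length : Int) 1)
    (by simp)
    (by intro j hj; rw [hrange] at hj; simp only [List.mem_map, List.mem_range] at hj
        obtain ⟨k, hk, rfl⟩ := hj; exact ⟨k, hk, rfl⟩)
    (by rw [hrange]
        exact (List.pairwise_lt_range).map _ (by intro a b hab; exact_mod_cast hab))
    (by intro k hk
        have hmemr : (k : Int) ∈ PySem.List.pyRange 0 (sets_list.length : Int) 1 :=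
          PySem.List.mem_pyRange_one.mpr (by constructor <;> omega)
        simp [hmemr])
    (by simp [hlenrem])
    (by omega)
  rw [hmain, hlenrem, hval]
  cases List.find? (pvExtOK (sets_list.map (fun p => p.2)) [])
      (pvPerms sets_list.length (PySem.List.pyRange 0 (sets_list.length : Int) 1)) <;> simp
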